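-- pv_equiv track=rewrite | github.com/neoforge-dev/synapse | business_development/content_scheduler.py | _extract_post_content
-- ===== SOURCE A (Python) =====
-- def _extract_post_content(raw_content: str) -> str:
--     """Extract actual post content from markdown"""
--     if "## Final Optimized Post" in raw_content or "## LinkedIn Post" in raw_content:
--         lines = raw_content.split('\n')
--         post_start = None
--
--         for i, line in enumerate(lines):
--             if "## Final Optimized Post" in line or "## LinkedIn Post" in line:
--                 post_start = i + 1
--                 break
--
--         if post_start:
--             post_content = []
--             for line in lines[post_start:]:
--                 if line.strip() and not line.startswith('#') and not line.startswith('**Content Strategy'):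
--                     post_content.append(line)
--                 elif line.startswith('---') or line.startswith('## Content Strategy'):
--                     break
--
--             return '\n'.join(post_content).strip()
--
--     return raw_content
-- ===== SOURCE B (Python) =====
-- def _extract_post_content(raw_content: str) -> str:
--     """Extract actual post content from markdown (two-pass: find boundary, then filter)"""
--     if "## Final Optimized Post" in raw_content or "## LinkedIn Post" in raw_content:
--         lines = raw_content.split('\n')
--         for i, line in enumerate(lines):
--             if "## Final Optimized Post" in line or "## LinkedIn Post" in line:
--                 section = lines[i + 1:]
--                 cut = next((j for j, l in enumerate(section)
--                             if l.startswith('## Content Strategy')), len(section))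
--                 kept = [l for l in section[:cut]
--                         if l.strip() and not l.startswith('#')
--                         and not l.startswith('**Content Strategy')]
--                 return '\n'.join(kept).strip()
--     return raw_content
-- ===== Notes on version B (the rewrite author's own statement) =====
-- stated objective: simpler
-- what changed: A's single intertwined loop with append/break (whose '---' break arm is dead code) is replaced by two separate passes: first compute the boundary index of the first '## Content Strategy' line, truncate the section there, then keep lines with a single list-comprehension filter and join/strip.
import Mathlib
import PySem

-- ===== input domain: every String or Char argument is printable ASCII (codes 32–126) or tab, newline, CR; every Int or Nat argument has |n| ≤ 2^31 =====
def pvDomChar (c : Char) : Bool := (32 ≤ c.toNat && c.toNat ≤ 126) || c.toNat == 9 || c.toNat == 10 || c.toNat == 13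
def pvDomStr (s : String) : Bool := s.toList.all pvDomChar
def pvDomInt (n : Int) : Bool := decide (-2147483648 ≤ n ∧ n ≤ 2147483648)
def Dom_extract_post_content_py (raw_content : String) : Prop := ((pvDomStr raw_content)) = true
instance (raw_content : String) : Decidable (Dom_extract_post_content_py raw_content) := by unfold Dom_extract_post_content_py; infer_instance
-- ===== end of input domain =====

-- B separates "where the content ends" (first '## Content Strategy' line) from "which lines to keep"
-- (a single filter) instead of A's one intertwined loop with a break; objective: simpler decomposition.

-- ===== PORT A =====
-- '"## Final Optimized Post" in s or "## LinkedIn Post" in s' (identical line in both Pythons)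
def pvHit (s : String) : Bool :=
  PySem.Str.isIn "## Final Optimized Post" s || PySem.Str.isIn "## LinkedIn Post" s

-- A's enumerate loop: post_start = i + 1 at the first hit
def pvA_findStart : List String → Nat → Option Nat
  | [], _ => none
  | l :: ls, i => if pvHit l then some (i + 1) else pvA_findStart ls (i + 1)

-- A's for loop over lines[post_start:] with append / break
def pvA_loop : List String → List String
  | [] => []
  | l :: ls =>
    if !(PySem.Str.strip l == "") && !PySem.Str.startswith l "#"
        && !PySem.Str.startswith l "**Content Strategy" then
      l :: pvA_loop ls
    else if PySem.Str.startswith l "---" || PySem.Str.startswith l "## Content Strategy" then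
      []
    else
      pvA_loop ls

def extract_post_content_py (raw_content : String) : String :=
  if pvHit raw_content then
    let lines := (PySem.Str.split? raw_content "\n").getD []
    match pvA_findStart lines 0 with
    | some post_start =>
        if post_start ≠ 0 then
          PySem.Str.strip (PySem.Str.join "\n" (pvA_loop (lines.drop post_start)))
        else raw_content
    | none => raw_content
  else raw_content

-- ===== PORT B =====
def pvB_keep (l : String) : Bool :=
  !(PySem.Str.strip l == "") && !PySem.Str.startswith l "#"
    && !PySem.Str.startswith l "**Content Strategy"

-- B's loop: at the first hit, truncate the tail at the first '## Content Strategy' line and filter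
def pvB_go : List String → Option String
  | [] => none
  | l :: ls =>
    if pvHit l then
      let cut := List.findIdx (fun x => PySem.Str.startswith x "## Content Strategy") ls
      some (PySem.Str.strip (PySem.Str.join "\n" ((ls.take cut).filter pvB_keep)))
    else pvB_go ls

def extract_post_content_py_alt (raw_content : String) : String :=
  if pvHit raw_content then
    (pvB_go ((PySem.Str.split? raw_content "\n").getD [])).getD raw_content
  else raw_content

-- ===== PRECONDITION & SPEC =====
def Spec_extract_post_content_py (raw_content : String) (out : String) : Prop := out = extract_post_content_py_alt raw_content
instance (raw_content : String) (out : String) : Decidable (Spec_extract_post_content_py raw_content out) := by unfold Spec_extract_post_content_py; infer_instance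

-- ===== CLAIM (what is proved, stated in full; the proofs are below) =====
def Claim_equal_extract_post_content_py : Prop := ∀ (raw_content : String), Dom_extract_post_content_py raw_content → Spec_extract_post_content_py raw_content (extract_post_content_py raw_content)

-- ===== LEMMAS AND PROOFS =====

lemma pv_findStart_ge : ∀ (ls : List String) (i ps : Nat),
    pvA_findStart ls i = some ps → i + 1 ≤ ps := by
  intro ls
  induction ls with
  | nil => intro i ps h; simp [pvA_findStart] at h
  | cons l ls ih =>
    intro i ps h
    simp only [pvA_findStart] at h
    by_cases hl : pvHit l = true
    · simp [hl] at h; omega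
    · simp [hl] at h; have := ih (i + 1) ps h; omega

-- a line starting with "## Content Strategy" starts with "#" (so is never kept)
lemma pv_cs_hash {l : String} (h : PySem.Str.startswith l "## Content Strategy" = true) :
    PySem.Str.startswith l "#" = true := by
  simp only [PySem.Str.startswith_eq, PySem.Chars.startswith_iff] at h ⊢
  exact List.IsPrefix.trans (by decide) h

-- a line starting with "---" always passes A's keep test (the '---' break arm is dead code)
lemma pv_dash_keep {l : String} (h : PySem.Str.startswith l "---" = true) :
    pvB_keep l = true := by
  simp only [PySem.Str.startswith_eq, PySem.Chars.startswith_iff] at h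
  obtain ⟨t, e⟩ := h
  have hl : l.toList = '-' :: '-' :: '-' :: t := by simpa using e.symm
  have h1 : (PySem.Str.strip l == "") = false := by
    rw [beq_eq_false_iff_ne]
    intro hs
    have hnil : (PySem.Str.strip l).toList = [] := by rw [hs]; rfl
    simp only [PySem.Str.toList_strip, PySem.Chars.strip, PySem.Chars.lstrip,
      PySem.Chars.rstrip, hl] at hnil
    rw [List.dropWhile_cons] at hnil
    simp only [show PySem.Chars.isspace '-' = false from rfl] at hnil
    simp only [Bool.false_eq_true, if_false, List.reverse_eq_nil_iff,
      List.dropWhile_eq_nil_iff] at hnil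
    have := hnil '-' (by simp)
    simp [PySem.Chars.isspace] at this
  have h2 : PySem.Str.startswith l "#" = false := by
    simp only [PySem.Str.startswith_eq]
    cases hp : PySem.Chars.startswith l.toList "#".toList with
    | false => rfl
    | true =>
      exfalso
      rw [PySem.Chars.startswith_iff] at hp
      obtain ⟨t2, e2⟩ := hp
      rw [hl] at e2; simp at e2
  have h3 : PySem.Str.startswith l "**Content Strategy" = false := by
    simp only [PySem.Str.startswith_eq]
    cases hp : PySem.Chars.startswith l.toList "**Content Strategy".toList with
    | false => rfl
    | true =>
      exfalso
      rw [PySem.Chars.startswith_iff] at hp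
      obtain ⟨t2, e2⟩ := hp
      rw [hl] at e2; simp at e2
  unfold pvB_keep
  rw [h1, h2, h3]
  rfl

-- A's single loop equals B's truncate-then-filter
lemma pv_loop_eq : ∀ ls : List String,
    pvA_loop ls =
      (ls.take (List.findIdx (fun x => PySem.Str.startswith x "## Content Strategy") ls)).filter pvB_keep := by
  intro ls
  induction ls with
  | nil => simp [pvA_loop]
  | cons l ls ih =>
    rw [List.findIdx_cons]
    unfold pvA_loop
    rw [show (!(PySem.Str.strip l == "") && !PySem.Str.startswith l "#"
      && !PySem.Str.startswith l "**Content Strategy") = pvB_keep l from rfl]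
    by_cases hcs : PySem.Str.startswith l "## Content Strategy" = true
    · have hk : pvB_keep l = false := by
        unfold pvB_keep
        rw [pv_cs_hash hcs]
        simp
      rw [hk, hcs]
      simp
    · have hcs' : PySem.Str.startswith l "## Content Strategy" = false := by
        cases h : PySem.Str.startswith l "## Content Strategy" <;> simp_all
      rw [hcs']
      simp only [cond_false, List.take_succ_cons, List.filter_cons]
      by_cases hk : pvB_keep l = true
      · rw [hk]
        simp [ih]
      · have hk' : pvB_keep l = false := by
          cases h : pvB_keep l <;> simp_all
        have hd : PySem.Str.startswith l "---" = false := by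
          cases h : PySem.Str.startswith l "---" with
          | false => rfl
          | true => exact absurd (pv_dash_keep h) hk
        rw [hk', hd]
        simp [ih]

-- B's loop agrees with A's find-then-drop processing at every enumerate offset
lemma pv_go_eq : ∀ (ls : List String) (i : Nat),
    pvB_go ls =
      (match pvA_findStart ls i with
       | some ps => some (PySem.Str.strip (PySem.Str.join "\n" (pvA_loop (ls.drop (ps - i)))))
       | none => none) := by
  intro ls
  induction ls with
  | nil => intro i; simp [pvB_go, pvA_findStart]
  | cons l ls ih =>
    intro i
    by_cases hl : pvHit l = true
    · simp only [pvB_go, pvA_findStart, hl, if_true]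
      have : i + 1 - i = 1 := by omega
      rw [this]
      simp [pv_loop_eq]
    · simp only [pvB_go, pvA_findStart, hl, if_false, Bool.false_eq_true]
      rw [ih (i + 1)]
      cases h : pvA_findStart ls (i + 1) with
      | none => rfl
      | some ps =>
        have hge := pv_findStart_ge ls (i + 1) ps h
        have h1 : ps - i = (ps - (i + 1)) + 1 := by omega
        simp only [h1, List.drop_succ_cons]

-- ===== VERDICT (by name: the statement is the Claim_ definition above) =====
theorem extract_post_content_py_spec : Claim_equal_extract_post_content_py := by
  unfold Claim_equal_extract_post_content_py
  intro raw _
  unfold Spec_extract_post_content_py extract_post_content_py extract_post_content_py_alt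
  by_cases hg : pvHit raw = true
  · simp only [hg, if_true]
    rw [pv_go_eq ((PySem.Str.split? raw "\n").getD []) 0]
    cases h : pvA_findStart ((PySem.Str.split? raw "\n").getD []) 0 with
    | none => rfl
    | some ps =>
      have := pv_findStart_ge _ 0 ps h
      have hne : ps ≠ 0 := by omega
      simp [hne]
  · simp [hg]
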